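-- pv_equiv track=rewrite | github.com/alexrichrd/aoc2025 | src/day02.py | compute_patterns_to_check
-- ===== SOURCE A (Python) =====
-- def compute_patterns_to_check(id_length: int) -> dict:
--     pattern_dict: dict = {}
--     divisors = []
--     # compute all divisors for a given length
--     for i in range(2, id_length + 1):
--         if id_length % i == 0:
--             divisors.append(i)
--     # compute all pattern combinations we need to check
--     for divisor1 in divisors:
--         for divisor2 in divisors:
--             if divisor1 * divisor2 == id_length:
--                 pattern_dict[divisor1] = divisor2
--     pattern_dict[id_length] = 1
--     return pattern_dict
-- ===== SOURCE B (Python) =====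
-- def compute_patterns_to_check(id_length: int) -> dict:
--     # single pass: every divisor d with 2 <= d <= id_length // 2 pairs with id_length // d
--     pattern_dict = {d: id_length // d
--                     for d in range(2, id_length // 2 + 1)
--                     if id_length % d == 0}
--     pattern_dict[id_length] = 1
--     return pattern_dict
-- ===== Notes on version B (the rewrite author's own statement) =====
-- stated objective: faster
-- what changed: Replaces A's divisor-list construction plus quadratic nested pairing loop with a single dict comprehension over the divisor candidates up to half of id_length that computes each complementary divisor directly by division.
import Mathlib
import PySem

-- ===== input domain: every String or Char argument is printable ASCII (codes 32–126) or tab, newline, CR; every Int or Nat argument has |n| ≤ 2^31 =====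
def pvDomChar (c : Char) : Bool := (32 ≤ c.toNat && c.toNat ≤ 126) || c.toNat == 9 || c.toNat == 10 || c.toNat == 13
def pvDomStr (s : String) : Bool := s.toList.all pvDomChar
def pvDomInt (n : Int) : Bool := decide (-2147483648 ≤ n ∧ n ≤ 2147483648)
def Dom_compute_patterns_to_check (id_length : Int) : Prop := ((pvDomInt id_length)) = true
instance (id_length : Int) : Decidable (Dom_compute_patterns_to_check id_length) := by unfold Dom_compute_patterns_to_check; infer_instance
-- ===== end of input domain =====

-- B replaces A's divisor list plus nested pairing loop with a single pass over the
-- divisor candidates up to half of id_length, computing each complement by division.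

-- ===== PORT A =====
def compute_patterns_to_check (id_length : Int) : List (Int × Int) :=
  let divisors := (PySem.List.pyRange 2 (id_length + 1) 1).foldl
    (fun ds i => if PySem.Int.mod id_length i == 0 then ds ++ [i] else ds) []
  let patternDict := divisors.foldl (fun d d1 =>
      divisors.foldl (fun d d2 =>
        if d1 * d2 == id_length then d.insert d1 d2 else d) d)
    (PySem.Dict.empty : PySem.Dict Int Int)
  (patternDict.insert id_length 1).items

-- ===== PORT B =====
def compute_patterns_to_check_alt (id_length : Int) : List (Int × Int) :=
  let patternDict := (PySem.List.pyRange 2 (PySem.Int.floordiv id_length 2 + 1) 1).foldl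
    (fun d k => if PySem.Int.mod id_length k == 0
                then d.insert k (PySem.Int.floordiv id_length k) else d)
    (PySem.Dict.empty : PySem.Dict Int Int)
  (patternDict.insert id_length 1).items

-- ===== PRECONDITION & SPEC =====
def Spec_compute_patterns_to_check (id_length : Int) (out : List (Int × Int)) : Prop := out = compute_patterns_to_check_alt id_length
instance (id_length : Int) (out : List (Int × Int)) : Decidable (Spec_compute_patterns_to_check id_length out) := by unfold Spec_compute_patterns_to_check; infer_instance

-- ===== CLAIM (what is proved, stated in full; the proofs are below) =====
def Claim_equal_compute_patterns_to_check : Prop := ∀ (id_length : Int), Dom_compute_patterns_to_check id_length → Spec_compute_patterns_to_check id_length (compute_patterns_to_check id_length)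

-- ===== LEMMAS AND PROOFS =====

-- the divisor list A builds: divisors of n in [2, n]
def pvDiv (n : Int) : List Int :=
  (PySem.List.pyRange 2 (n + 1) 1).filter (fun i => PySem.Int.mod n i == 0)

theorem pvDiv_nodup (n : Int) : (pvDiv n).Nodup :=
  (PySem.List.nodup_pyRange_one 2 (n + 1)).filter _

theorem mem_pvDiv (n x : Int) : x ∈ pvDiv n ↔ (2 ≤ x ∧ x < n + 1) ∧ x ∣ n := by
  simp [pvDiv, PySem.List.mem_pyRange_one, PySem.Int.mod_eq_zero_iff_dvd]

-- the inner filter of A's nested loop keeps at most the complementary divisor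
theorem pvInner_filter (n d1 : Int) (h2 : 2 ≤ d1) (hdvd : d1 ∣ n) :
    (pvDiv n).filter (fun d2 => d1 * d2 == n) =
      if 2 * d1 ≤ n then [n / d1] else [] := by
  have hd1pos : (0 : Int) < d1 := by omega
  have hc : d1 * (n / d1) = n := Int.mul_ediv_cancel' hdvd
  have hstep : (pvDiv n).filter (fun d2 => d1 * d2 == n) =
      (pvDiv n).filter (fun d2 => d2 == n / d1) := by
    apply List.filter_congr
    intro x _
    rw [Bool.eq_iff_iff, beq_iff_eq, beq_iff_eq]
    constructor
    · intro hx
      have := hc.trans hx.symm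
      exact (mul_left_cancel₀ (ne_of_gt hd1pos) this).symm
    · intro hx; rw [hx]; exact hc
  rw [hstep, List.filter_beq]
  by_cases hcase : 2 * d1 ≤ n
  · have hmem : n / d1 ∈ pvDiv n := by
      rw [mem_pvDiv]
      have h2c : 2 ≤ n / d1 := by
        have : d1 * 2 ≤ d1 * (n / d1) := by rw [hc]; linarith
        exact le_of_mul_le_mul_left this hd1pos
      refine ⟨⟨h2c, by nlinarith⟩, ⟨d1, by linarith [hc]⟩⟩
    rw [if_pos hcase, List.count_eq_one_of_mem (pvDiv_nodup n) hmem, List.replicate_one]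
  · have hnmem : n / d1 ∉ pvDiv n := by
      intro hmem
      rw [mem_pvDiv] at hmem
      have := hmem.1.1
      nlinarith
    rw [if_neg hcase, List.count_eq_zero.mpr hnmem, List.replicate_zero]

-- A's inner loop over the divisor list inserts exactly the complementary divisor (or nothing)
theorem pvInner_fold (n d1 : Int) (h2 : 2 ≤ d1) (hdvd : d1 ∣ n)
    (d : PySem.Dict Int Int) :
    (pvDiv n).foldl (fun d d2 => if d1 * d2 == n then d.insert d1 d2 else d) d =
      if 2 * d1 ≤ n then d.insert d1 (n / d1) else d := by
  simp only [PySem.List.foldl_if_eq_foldl_filter]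
  rw [pvInner_filter n d1 h2 hdvd]
  by_cases hcase : 2 * d1 ≤ n
  · rw [if_pos hcase, if_pos hcase]; rfl
  · rw [if_neg hcase, if_neg hcase]; rfl

-- range [2, n] restricted to the lower half is range [2, n//2]
theorem pvRange_half (n : Int) :
    (PySem.List.pyRange 2 (n + 1) 1).filter (fun i => decide (2 * i ≤ n)) =
      PySem.List.pyRange 2 (PySem.Int.floordiv n 2 + 1) 1 := by
  by_cases hn : 2 ≤ n
  · have hm1 : (2 : Int) ≤ PySem.Int.floordiv n 2 + 1 := by
      have : (1 : Int) ≤ PySem.Int.floordiv n 2 :=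
        (PySem.Int.le_floordiv_iff_mul_le (by norm_num)).mpr (by linarith)
      linarith
    have hm2 : PySem.Int.floordiv n 2 + 1 ≤ n + 1 := by
      have : PySem.Int.floordiv n 2 < n + 1 :=
        (PySem.Int.floordiv_lt_iff_lt_mul (by norm_num)).mpr (by linarith)
      linarith
    rw [PySem.List.pyRange_one_append 2 (PySem.Int.floordiv n 2 + 1) (n + 1) hm1 hm2,
        List.filter_append]
    have hfirst : (PySem.List.pyRange 2 (PySem.Int.floordiv n 2 + 1) 1).filter
        (fun i => decide (2 * i ≤ n)) = PySem.List.pyRange 2 (PySem.Int.floordiv n 2 + 1) 1 := by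
      apply List.filter_eq_self.mpr
      intro x hx
      rw [PySem.List.mem_pyRange_one] at hx
      have : x ≤ PySem.Int.floordiv n 2 := by omega
      have := (PySem.Int.le_floordiv_iff_mul_le (b := 2) (by norm_num)).mp this
      simpa using by linarith
    have hsecond : (PySem.List.pyRange (PySem.Int.floordiv n 2 + 1) (n + 1) 1).filter
        (fun i => decide (2 * i ≤ n)) = [] := by
      apply List.filter_eq_nil_iff.mpr
      intro x hx
      rw [PySem.List.mem_pyRange_one] at hx
      have hgt : PySem.Int.floordiv n 2 < x := by omega
      have := (PySem.Int.floordiv_lt_iff_lt_mul (b := 2) (q := x) (by norm_num)).mp hgt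
      simpa using by linarith
    rw [hfirst, hsecond, List.append_nil]
  · have h1 : (PySem.List.pyRange 2 (n + 1) 1) = [] :=
      PySem.List.pyRange_one_eq_nil (by omega)
    have h2 : (PySem.List.pyRange 2 (PySem.Int.floordiv n 2 + 1) 1) = [] := by
      apply PySem.List.pyRange_one_eq_nil
      have : PySem.Int.floordiv n 2 < 2 :=
        (PySem.Int.floordiv_lt_iff_lt_mul (by norm_num)).mpr (by linarith)
      linarith
    rw [h1, h2]; rfl

-- the key list both sides produce before the final insert
def pvKeys (n : Int) : List Int :=
  (PySem.List.pyRange 2 (PySem.Int.floordiv n 2 + 1) 1).filter (fun i => PySem.Int.mod n i == 0)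

theorem pvKeys_eq_filter_pvDiv (n : Int) :
    (pvDiv n).filter (fun i => decide (2 * i ≤ n)) = pvKeys n := by
  rw [pvDiv, List.filter_comm, pvRange_half, pvKeys]

theorem mem_pvKeys (n x : Int) (hx : x ∈ pvKeys n) : 2 ≤ x ∧ 2 * x ≤ n ∧ x ∣ n := by
  rw [← pvKeys_eq_filter_pvDiv] at hx
  simp only [List.mem_filter, decide_eq_true_eq] at hx
  obtain ⟨hd, h2x⟩ := hx
  rw [mem_pvDiv] at hd
  exact ⟨hd.1.1, h2x, hd.2⟩

theorem pvKeys_nodup (n : Int) : (pvKeys n).Nodup :=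
  (PySem.List.nodup_pyRange_one 2 (PySem.Int.floordiv n 2 + 1)).filter _

theorem n_not_mem_pvKeys (n : Int) : n ∉ pvKeys n := by
  intro h
  obtain ⟨h1, h2, _⟩ := mem_pvKeys n n h
  omega

-- items of a fresh-key insert loop over pvKeys, with the trailing (n, 1)
theorem pvBuild_items (n : Int) (v : Int → Int) :
    ((((pvKeys n).foldl (fun d a => d.insert a (v a))
        (PySem.Dict.empty : PySem.Dict Int Int)).insert n 1).items) =
      (pvKeys n).map (fun a => (a, v a)) ++ [(n, 1)] := by
  have hemp : (PySem.Dict.empty : PySem.Dict Int Int).items = [] := rfl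
  have hnodup : ((pvKeys n).map (fun a => a)).Nodup := by
    rw [List.map_id']; exact pvKeys_nodup n
  have hitems := PySem.Dict.items_foldl_insert_fresh (pvKeys n) (fun a => a) v
      (PySem.Dict.empty : PySem.Dict Int Int) (fun a _ => PySem.Dict.contains_empty a) hnodup
  rw [hemp, List.nil_append] at hitems
  have hcont : ((pvKeys n).foldl (fun d a => d.insert a (v a))
      (PySem.Dict.empty : PySem.Dict Int Int)).contains n = false := by
    rw [PySem.Dict.contains_eq_decide_mem_keys, decide_eq_false_iff_not]
    intro hmem
    simp only [PySem.Dict.keys, hitems, List.map_map] at hmem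
    have : n ∈ pvKeys n := by simpa using hmem
    exact n_not_mem_pvKeys n this
  rw [PySem.Dict.items_insert_of_not_contains _ _ hcont, hitems]

theorem portA_eq (n : Int) :
    compute_patterns_to_check n = (pvKeys n).map (fun a => (a, n / a)) ++ [(n, 1)] := by
  simp only [compute_patterns_to_check]
  rw [PySem.List.foldl_append_if_eq_filter (fun i => PySem.Int.mod n i == 0), List.nil_append]
  have hcongr : (pvDiv n).foldl (fun d d1 => (pvDiv n).foldl
        (fun d d2 => if d1 * d2 == n then d.insert d1 d2 else d) d)
        (PySem.Dict.empty : PySem.Dict Int Int) =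
      (pvDiv n).foldl (fun d d1 => if 2 * d1 ≤ n then d.insert d1 (n / d1) else d)
        (PySem.Dict.empty : PySem.Dict Int Int) := by
    apply PySem.List.foldl_congr_mem
    intro acc x hx
    rw [mem_pvDiv] at hx
    exact pvInner_fold n x hx.1.1 hx.2 acc
  rw [show ((PySem.List.pyRange 2 (n + 1) 1).filter (fun i => PySem.Int.mod n i == 0)) = pvDiv n from rfl,
      hcongr]
  simp only [PySem.List.foldl_ite_eq_foldl_filter]
  rw [pvKeys_eq_filter_pvDiv]
  exact pvBuild_items n (fun a => n / a)

theorem portB_eq (n : Int) :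
    compute_patterns_to_check_alt n =
      (pvKeys n).map (fun a => (a, PySem.Int.floordiv n a)) ++ [(n, 1)] := by
  simp only [compute_patterns_to_check_alt]
  simp only [PySem.List.foldl_if_eq_foldl_filter]
  rw [show ((PySem.List.pyRange 2 (PySem.Int.floordiv n 2 + 1) 1).filter
        (fun i => PySem.Int.mod n i == 0)) = pvKeys n from rfl]
  exact pvBuild_items n (fun a => PySem.Int.floordiv n a)

-- ===== VERDICT (by name: the statement is the Claim_ definition above) =====
theorem compute_patterns_to_check_spec : Claim_equal_compute_patterns_to_check := by
  intro n _
  unfold Spec_compute_patterns_to_check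
  rw [portA_eq, portB_eq]
  congr 1
  apply List.map_congr_left
  intro x hx
  obtain ⟨h2, _, _⟩ := mem_pvKeys n x hx
  rw [PySem.Int.floordiv_eq_ediv_of_pos (by omega)]
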